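-- pv_equiv track=rewrite | github.com/canonical/checkbox | contrib/checkbox-ce-oem/checkbox-provider-ce-oem/bin/camera_utils.py | _parse_device_groups
-- ===== SOURCE A (Python) =====
-- from typing import Dict, List, Optional, Type
--
-- def _parse_device_groups(
--     v4l2_devices: str
-- ) -> Dict[str, Dict[str, List[str]]]:
--     """
--     Parse V4L2 device list into grouped structure.
--
--     Args:
--         v4l2_devices: Raw V4L2 device list string from
--         `v4l2-ctl --list-devices`
--
--     Returns:
--         Dictionary mapping device group names to their categorized device
--         nodes
--         Format:
--         {
--             "v4l2_device_name": {
--                 "video": [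
--                     "/dev/videoX",
--                     "/dev/videoY",
--                     "/dev/videoZ",
--                 ],
--                 "media": ["/dev/mediaX"],
--                 "others": []
--             }
--         }
--     """
--     device_groups = {}
--     current_group = None
--     lines = v4l2_devices.strip().split("\n")
--
--     for line in lines:
--         line = line.strip()
--         if not line:
--             continue
--
--         # Check if this is a group header (ends with ':')
--         if line.endswith(":"):
--             current_group = line[:-1]  # Remove the trailing ':'
--             device_groups[current_group] = {
--                 "video": [],
--                 "media": [],
--                 "others": [],
--             }
--         elif current_group and line.startswith("/dev/"):
--             # Categorize device nodes
--             if line.startswith("/dev/video"):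
--                 device_groups[current_group]["video"].append(line)
--             elif line.startswith("/dev/media"):
--                 device_groups[current_group]["media"].append(line)
--             else:
--                 device_groups[current_group]["others"].append(line)
--
--     return device_groups
-- ===== SOURCE B (Python) =====
-- def _parse_device_groups(v4l2_devices):
--     # Pass 1: ordered map from group name -> flat list of device lines (last header wins).
--     sections = {}
--     current = None
--     for raw in v4l2_devices.strip().split("\n"):
--         line = raw.strip()
--         if not line:
--             continue
--         if line.endswith(":"):
--             current = line[:-1]
--             sections[current] = []
--         elif current and line.startswith("/dev/"):
--             sections[current].append(line)
--     # Pass 2: categorize each group's collected lines.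
--     return {
--         name: {
--             "video": [d for d in devs if d.startswith("/dev/video")],
--             "media": [d for d in devs if d.startswith("/dev/media")],
--             "others": [d for d in devs
--                        if not d.startswith("/dev/video")
--                        and not d.startswith("/dev/media")],
--         }
--         for name, devs in sections.items()
--     }
-- ===== Notes on version B (the rewrite author's own statement) =====
-- stated objective: simpler
-- what changed: A builds the nested {video,media,others} dict and categorizes each device line inline during its single scan; B first collects a flat ordered map of group name -> device lines (last duplicate header wins), then categorizes each group's lines with three filters in a second pass.
import Mathlib
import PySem

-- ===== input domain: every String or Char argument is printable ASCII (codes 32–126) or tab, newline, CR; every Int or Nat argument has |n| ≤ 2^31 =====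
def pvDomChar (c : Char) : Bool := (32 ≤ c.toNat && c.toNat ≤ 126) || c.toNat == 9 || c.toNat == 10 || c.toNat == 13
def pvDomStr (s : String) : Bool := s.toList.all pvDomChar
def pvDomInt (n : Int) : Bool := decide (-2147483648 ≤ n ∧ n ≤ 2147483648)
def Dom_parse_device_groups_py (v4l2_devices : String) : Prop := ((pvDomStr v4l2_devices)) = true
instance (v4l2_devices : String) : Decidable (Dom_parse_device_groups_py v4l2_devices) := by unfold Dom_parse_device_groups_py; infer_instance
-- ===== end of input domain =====

-- B replaces A's single pass into a nested dict by a two-pass decomposition (collect flat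
-- per-group device lists, then categorize each group with filters); objective: simpler.

-- ===== PORT A =====
def pvCatInit : PySem.Dict String (List String) :=
  ((PySem.Dict.empty.insert "video" []).insert "media" []).insert "others" []

def pvAStep (st : PySem.Dict String (PySem.Dict String (List String)) × Option String)
    (raw : String) : PySem.Dict String (PySem.Dict String (List String)) × Option String :=
  let line := PySem.Str.strip raw
  if line = "" then st
  else if PySem.Str.endswith line ":" then
    let g := PySem.Str.slice line none (some (-1))
    (st.1.insert g pvCatInit, some g)
  else
    match st.2 with
    | some g =>
      -- 'current_group and line.startswith("/dev/")': falsy current_group ("" or None) skips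
      if g ≠ "" ∧ PySem.Str.startswith line "/dev/" = true then
        if PySem.Str.startswith line "/dev/video" then
          (st.1.modify g PySem.Dict.empty (fun inner => inner.modify "video" [] (· ++ [line])), st.2)
        else if PySem.Str.startswith line "/dev/media" then
          (st.1.modify g PySem.Dict.empty (fun inner => inner.modify "media" [] (· ++ [line])), st.2)
        else
          (st.1.modify g PySem.Dict.empty (fun inner => inner.modify "others" [] (· ++ [line])), st.2)
      else st
    | none => st

def parse_device_groups_py (v4l2_devices : String) : List (String × List (String × List String)) :=
  let lines := (PySem.Str.split? (PySem.Str.strip v4l2_devices) "\n").getD []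
  let d := (lines.foldl pvAStep (PySem.Dict.empty, none)).1
  d.items.map (fun p => (p.1, p.2.items))

-- ===== PORT B =====
def pvBStep (st : PySem.Dict String (List String) × Option String)
    (raw : String) : PySem.Dict String (List String) × Option String :=
  let line := PySem.Str.strip raw
  if line = "" then st
  else if PySem.Str.endswith line ":" then
    let g := PySem.Str.slice line none (some (-1))
    (st.1.insert g [], some g)
  else
    match st.2 with
    | some g =>
      if g ≠ "" ∧ PySem.Str.startswith line "/dev/" = true then
        (st.1.modify g [] (· ++ [line]), st.2)
      else st
    | none => st

def pvCategorize (devs : List String) : List (String × List String) :=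
  [("video", devs.filter (fun d => PySem.Str.startswith d "/dev/video")),
   ("media", devs.filter (fun d => PySem.Str.startswith d "/dev/media")),
   ("others", devs.filter (fun d => !PySem.Str.startswith d "/dev/video" && !PySem.Str.startswith d "/dev/media"))]

def parse_device_groups_py_alt (v4l2_devices : String) : List (String × List (String × List String)) :=
  let lines := (PySem.Str.split? (PySem.Str.strip v4l2_devices) "\n").getD []
  let sections := (lines.foldl pvBStep (PySem.Dict.empty, none)).1
  sections.items.map (fun p => (p.1, pvCategorize p.2))

-- ===== PRECONDITION & SPEC =====
def Spec_parse_device_groups_py (v4l2_devices : String) (out : List (String × List (String × List String))) : Prop := out = parse_device_groups_py_alt v4l2_devices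
instance (v4l2_devices : String) (out : List (String × List (String × List String))) : Decidable (Spec_parse_device_groups_py v4l2_devices out) := by unfold Spec_parse_device_groups_py; infer_instance

-- ===== CLAIM (what is proved, stated in full; the proofs are below) =====
def Claim_equal_parse_device_groups_py : Prop := ∀ (v4l2_devices : String), Dom_parse_device_groups_py v4l2_devices → Spec_parse_device_groups_py v4l2_devices (parse_device_groups_py v4l2_devices)

-- ===== LEMMAS AND PROOFS =====
def pvF (p : String × List String) : String × PySem.Dict String (List String) :=
  (p.1, PySem.Dict.mk (pvCategorize p.2))

def pvInv (sA : PySem.Dict String (PySem.Dict String (List String)) × Option String)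
    (sB : PySem.Dict String (List String) × Option String) : Prop :=
  sA.2 = sB.2 ∧ sA.1.items = sB.1.items.map pvF ∧ sB.1.keys.Nodup ∧
    (∀ g, sB.2 = some g → sB.1.contains g = true)

theorem pv_video_not_media (d : String) (h : PySem.Str.startswith d "/dev/video" = true) :
    PySem.Str.startswith d "/dev/media" = false := by
  by_contra hne
  rw [Bool.not_eq_false] at hne
  simp only [PySem.Str.startswith_eq] at h hne
  rw [PySem.Chars.startswith_iff] at h hne
  rcases List.prefix_or_prefix_of_prefix h hne with hp | hp <;> exact absurd (hp.eq_of_length (by decide)) (by decide)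

theorem pvCatInit_eq : pvCatInit = PySem.Dict.mk [("video",[]),("media",[]),("others",[])] := rfl

theorem pv_keys_eq {dA : PySem.Dict String (PySem.Dict String (List String))}
    {dB : PySem.Dict String (List String)} (h : dA.items = dB.items.map pvF) :
    dA.keys = dB.keys := by
  simp only [PySem.Dict.keys, h, List.map_map]
  rfl

theorem pv_insert_rel {dA : PySem.Dict String (PySem.Dict String (List String))}
    {dB : PySem.Dict String (List String)} (h : dA.items = dB.items.map pvF)
    (g : String) :
    (dA.insert g pvCatInit).items = (dB.insert g []).items.map pvF := by
  have hc : dA.contains g = dB.contains g := by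
    classical
    rw [PySem.Dict.contains_eq_decide_mem_keys, PySem.Dict.contains_eq_decide_mem_keys, pv_keys_eq h]
  rw [PySem.Dict.items_insert, PySem.Dict.items_insert, hc]
  by_cases hg : dB.contains g = true
  · simp only [hg, if_true, h, List.map_map]
    apply List.map_congr_left
    intro p _
    by_cases hp : p.1 = g
    · simp [pvF, hp, pvCatInit_eq, pvCategorize]
    · simp [pvF, hp]
  · simp only [Bool.not_eq_true] at hg
    simp [hg, h, pvF, pvCatInit_eq, pvCategorize]

theorem pv_cat_append_video {devs : List String} {line : String}
    (h : PySem.Str.startswith line "/dev/video" = true) :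
    (PySem.Dict.mk (pvCategorize devs)).modify "video" [] (· ++ [line]) =
      PySem.Dict.mk (pvCategorize (devs ++ [line])) := by
  have hm := pv_video_not_media _ h
  simp at h hm
  simp [PySem.Dict.modify, PySem.Dict.insert, PySem.Dict.getD, PySem.Dict.get?,
    PySem.Dict.contains, pvCategorize, List.filter_append, h, hm]

theorem pv_cat_append_media {devs : List String} {line : String}
    (hv : PySem.Str.startswith line "/dev/video" = false)
    (h : PySem.Str.startswith line "/dev/media" = true) :
    (PySem.Dict.mk (pvCategorize devs)).modify "media" [] (· ++ [line]) =
      PySem.Dict.mk (pvCategorize (devs ++ [line])) := by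
  simp at h hv
  simp [PySem.Dict.modify, PySem.Dict.insert, PySem.Dict.getD, PySem.Dict.get?,
    PySem.Dict.contains, pvCategorize, List.filter_append, h, hv]

theorem pv_cat_append_others {devs : List String} {line : String}
    (hv : PySem.Str.startswith line "/dev/video" = false)
    (hm : PySem.Str.startswith line "/dev/media" = false) :
    (PySem.Dict.mk (pvCategorize devs)).modify "others" [] (· ++ [line]) =
      PySem.Dict.mk (pvCategorize (devs ++ [line])) := by
  simp at hv hm
  simp [PySem.Dict.modify, PySem.Dict.insert, PySem.Dict.getD, PySem.Dict.get?,
    PySem.Dict.contains, pvCategorize, List.filter_append, hv, hm]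

theorem pv_modify_rel {dA : PySem.Dict String (PySem.Dict String (List String))}
    {dB : PySem.Dict String (List String)} (h : dA.items = dB.items.map pvF)
    (hnd : dB.keys.Nodup) (g : String) (hg : dB.contains g = true) (key : String)
    (line : String)
    (hkey : (PySem.Dict.mk (pvCategorize (dB.getD g []))).modify key [] (· ++ [line]) =
      PySem.Dict.mk (pvCategorize (dB.getD g [] ++ [line]))) :
    (dA.modify g PySem.Dict.empty (fun inner => inner.modify key [] (· ++ [line]))).items =
      (dB.modify g [] (· ++ [line])).items.map pvF := by
  classical
  have hgmem : g ∈ dB.keys := by rw [← PySem.Dict.contains_iff_mem_keys]; exact hg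
  obtain ⟨v, hv⟩ : ∃ v, dB.get? g = some v := by
    apply Option.isSome_iff_exists.mp
    rw [← PySem.Dict.contains_eq_isSome_get?]; exact hg
  have hgd : dB.getD g [] = v := by rw [PySem.Dict.getD_eq_get?_getD, hv]; rfl
  have hvB : (g, dB.getD g []) ∈ dB.items := by
    rw [hgd]; exact PySem.Dict.mem_items_of_get?_eq_some dB hv
  have hvA : (g, PySem.Dict.mk (pvCategorize (dB.getD g []))) ∈ dA.items := by
    rw [h]; exact List.mem_map.mpr ⟨_, hvB, rfl⟩
  have hndA : dA.keys.Nodup := by rw [pv_keys_eq h]; exact hnd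
  have hAget : dA.getD g PySem.Dict.empty = PySem.Dict.mk (pvCategorize (dB.getD g [])) :=
    PySem.Dict.getD_of_mem_items dA hvA hndA PySem.Dict.empty
  have hcA : dA.contains g = true := by
    rw [PySem.Dict.contains_eq_decide_mem_keys, pv_keys_eq h]; simpa using hgmem
  show (dA.insert g ((dA.getD g PySem.Dict.empty).modify key [] (· ++ [line]))).items =
      ((dB.insert g (dB.getD g [] ++ [line])).items).map pvF
  rw [PySem.Dict.items_insert_of_contains dA _ hcA, PySem.Dict.items_insert_of_contains dB _ hg,
    hAget, hkey, h]
  simp only [List.map_map]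
  apply List.map_congr_left
  intro p _
  by_cases hp : p.1 = g
  · simp [Function.comp, pvF, hp]
  · simp [Function.comp, pvF, hp]

set_option maxHeartbeats 1000000 in
theorem pv_step_inv (dA : PySem.Dict String (PySem.Dict String (List String)))
    (dB : PySem.Dict String (List String)) (c : Option String) (raw : String)
    (hitems : dA.items = dB.items.map pvF) (hnd : dB.keys.Nodup)
    (hpres : ∀ g, c = some g → dB.contains g = true) :
    pvInv (pvAStep (dA, c) raw) (pvBStep (dB, c) raw) := by
  unfold pvAStep pvBStep
  by_cases h1 : PySem.Str.strip raw = ""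
  · simp only [h1, if_true]
    exact ⟨rfl, hitems, hnd, hpres⟩
  by_cases h2 : PySem.Str.endswith (PySem.Str.strip raw) ":" = true
  · simp only [h1, if_false, h2, if_true]
    refine ⟨rfl, pv_insert_rel hitems _, PySem.Dict.nodup_keys_insert _ _ _ hnd, ?_⟩
    intro g hgeq
    obtain rfl : _ = g := Option.some_inj.mp hgeq
    exact PySem.Dict.contains_insert_self _ _ _
  have h2' : PySem.Str.endswith (PySem.Str.strip raw) ":" = false := by
    simpa using h2
  simp only [h1, if_false, h2', Bool.false_eq_true, if_false]
  cases c with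
  | none => exact ⟨rfl, hitems, hnd, by simp⟩
  | some g =>
    have hg : dB.contains g = true := hpres g rfl
    dsimp only
    by_cases h3 : g ≠ "" ∧ PySem.Str.startswith (PySem.Str.strip raw) "/dev/" = true
    · rw [if_pos h3, if_pos h3]
      have hnd' : (dB.modify g [] (· ++ [PySem.Str.strip raw])).keys.Nodup := by
        rw [PySem.Dict.keys_modify]; exact PySem.Dict.nodup_keys_insert _ _ _ hnd
      have hpres' : ∀ g', some g = some g' →
          (dB.modify g [] (· ++ [PySem.Str.strip raw])).contains g' = true := by
        intro g' hg'
        obtain rfl : g = g' := Option.some_inj.mp hg'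
        rw [PySem.Dict.contains_modify]
        simp
      by_cases hv : PySem.Str.startswith (PySem.Str.strip raw) "/dev/video" = true
      · simp only [hv, if_true]
        exact ⟨rfl, pv_modify_rel hitems hnd g hg _ _ (pv_cat_append_video hv), hnd', hpres'⟩
      have hv' : PySem.Str.startswith (PySem.Str.strip raw) "/dev/video" = false := by
        simpa using hv
      simp only [hv', Bool.false_eq_true, if_false]
      by_cases hm : PySem.Str.startswith (PySem.Str.strip raw) "/dev/media" = true
      · simp only [hm, if_true]
        exact ⟨rfl, pv_modify_rel hitems hnd g hg _ _ (pv_cat_append_media hv' hm), hnd', hpres'⟩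
      have hm' : PySem.Str.startswith (PySem.Str.strip raw) "/dev/media" = false := by
        simpa using hm
      simp only [hm', Bool.false_eq_true, if_false]
      exact ⟨rfl, pv_modify_rel hitems hnd g hg _ _ (pv_cat_append_others hv' hm'), hnd', hpres'⟩
    · rw [if_neg h3, if_neg h3]
      exact ⟨rfl, hitems, hnd, by intro g' hg'; obtain rfl : g = g' := Option.some_inj.mp hg'; exact hg⟩

theorem pv_fold_inv (ls : List String)
    (sA : PySem.Dict String (PySem.Dict String (List String)) × Option String)
    (sB : PySem.Dict String (List String) × Option String)
    (h : pvInv sA sB) : pvInv (ls.foldl pvAStep sA) (ls.foldl pvBStep sB) := by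
  induction ls generalizing sA sB with
  | nil => exact h
  | cons x xs ih =>
    obtain ⟨hcur, hitems, hnd, hpres⟩ := h
    obtain ⟨dA, cA⟩ := sA
    obtain ⟨dB, cB⟩ := sB
    cases hcur
    exact ih _ _ (pv_step_inv dA dB cA x hitems hnd hpres)

-- ===== VERDICT (by name: the statement is the Claim_ definition above) =====
theorem parse_device_groups_py_spec : Claim_equal_parse_device_groups_py := by
  intro v _
  unfold Spec_parse_device_groups_py parse_device_groups_py parse_device_groups_py_alt
  have h0 : pvInv (PySem.Dict.empty, none) (PySem.Dict.empty, none) := by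
    refine ⟨rfl, rfl, ?_, by simp⟩
    simp [PySem.Dict.keys, PySem.Dict.empty]
  have h := pv_fold_inv ((PySem.Str.split? (PySem.Str.strip v) "\n").getD []) _ _ h0
  obtain ⟨-, hitems, -, -⟩ := h
  simp only [hitems, List.map_map]
  rfl
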